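/- GENERATED by mk_final_copies.py from the proof of the farm's unit `arena_unpoison` (farm:arena_unpoison.1: Proof.lean) as the
   re-elaboration sweep compiled it — do not edit. -/
import Asan.CheckWalk
import Vorbis.Spec.Units.arena_unpoison

open X86 X86.User Asan Vorbis

set_option maxRecDepth 4000
set_option maxHeartbeats 4000000

namespace Vorbis.Spec.arena_unpoison

/-! ### Words that hold small numbers (the size left, `rsi`, is at most C00000H: signed = unsigned) -/

/-- A small number as a word, read back as a number. -/
theorem toNat_ofNat_small (m : Nat) (hm : m < 2 ^ 63) : (UInt64.ofNat m).toNat = m := by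
  rw [UInt64.toNat_ofNat']
  omega

/-- A small number as a word, read as a SIGNED number (what `cmp rsi, 7 ; jg` compares). -/
theorem toInt_ofNat_small (m : Nat) (hm : m < 2 ^ 63) : (UInt64.ofNat m).toBitVec.toInt = (m : Int) := by
  have e : (UInt64.ofNat m).toBitVec.toNat = m := toNat_ofNat_small m hm
  have h2 : 2 * m < 2 ^ 64 := by omega
  rw [BitVec.toInt_eq_toNat_cond, e, if_pos h2]

/-- A small number as a word is not negative (what `test rsi, rsi ; jle` looks at). -/
theorem msb_ofNat_small (m : Nat) (hm : m < 2 ^ 63) : (UInt64.ofNat m).toBitVec.msb = false := by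
  have e : (UInt64.ofNat m).toBitVec.toNat = m := toNat_ofNat_small m hm
  rw [BitVec.msb_eq_decide, e]
  simp only [decide_eq_false_iff_not]
  omega

/-- 0x100c15 `cmp rsi, 7` / 0x100c19 `jg`, in numbers (asan_rt.c:132 `while (size >= 8)`): the walker's branch condition says
`7 < m`. -/
theorem jg_iff (m : Nat) (hm : m < 2 ^ 63) : (7#64).toInt < (UInt64.ofNat m).toBitVec.toInt ↔ 8 ≤ m := by
  have e7 : (7#64).toInt = 7 := by decide
  rw [e7, toInt_ofNat_small m hm]
  omega

/-- 0x100c1b `test rsi, rsi` / 0x100c1e `jle`, in numbers (asan_rt.c:137 `if (size > 0)`): the walker's branch condition says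
`m = 0` (a small number is not negative). -/
theorem jle_iff (m : Nat) (hm : m < 2 ^ 63) :
    ((UInt64.ofNat m).toNat = 0 ∨ (UInt64.ofNat m).toBitVec.msb = true) ↔ m = 0 := by
  rw [toNat_ofNat_small m hm, msb_ofNat_small m hm]
  simp only [Bool.false_eq_true, or_false]

/-- 0x100c11 `sub rsi, 8` on a size of at least 8, in numbers. -/
theorem ofNat_sub_eight (m : Nat) (hm : 8 ≤ m) : UInt64.ofNat m - 8 = UInt64.ofNat (m - 8) := by
  have e8 : (8 : UInt64) = UInt64.ofNat 8 := rfl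
  have e : UInt64.ofNat m = UInt64.ofNat (m - 8) + 8 := by
    rw [e8, ← UInt64.ofNat_add]
    congr 1
    omega
  rw [e, UInt64.add_sub_cancel]

/-- 0x100c0d `add rdi, 1` on the granule counter, in numbers. -/
theorem ofNat_add_one (g k : Nat) : UInt64.ofNat (g + k) + 1 = UInt64.ofNat (g + (k + 1)) := by
  have e1 : (1 : UInt64) = UInt64.ofNat 1 := rfl
  rw [e1, ← UInt64.ofNat_add, Nat.add_assoc]

/-- The byte 0x100c20 `mov [rdi + C00000H], sil` stores, for a size below 8: the size. -/
theorem part8_ofNat_small (m : Nat) (hm : m ≤ 7) : (Word.part Width.w8 (UInt64.ofNat m)).toNat = m := by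
  unfold Word.part
  simp only [Width.bits, BitVec.toNat_setWidth, UInt64.toNat_toBitVec, UInt64.toNat_ofNat']
  omega

/-! ### The stores of the routine and the store sequences `fillMem` / `unpoisonMem` of the contract -/

/-- The address the routine stores at, `g + C00000H` with `g` the granule in rdi, is the shadow address of granule `g`. -/
theorem shadowAddr_eq (g : Nat) : UInt64.ofNat g + 12582912 = shadowAddr g := by
  unfold shadowAddr
  rw [Nat.add_comm, UInt64.ofNat_add]
  rfl

/-- `fillMem` with one more granule: the last store is the one at granule `g + k` (the loop of `arena_unpoison` stores in
ascending order, `fillMem` recurses from the front). -/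
theorem fillMem_snoc (mem : Mem) (g : Nat) (v : Byte) (k : Nat) :
    fillMem mem g v (k + 1) = (fillMem mem g v k).write (shadowAddr (g + k)) v := by
  induction k generalizing mem g with
  | zero => rfl
  | succ k ih =>
    have e : g + (k + 1) = g + 1 + k := by omega
    rw [e]
    exact ih (mem.write (shadowAddr g) v) (g + 1)

/-- **One round of the loop** (0x100c06 `mov byte [rdi + C00000H], 0`, asan_rt.c:133): after `k` granules, the store of the
walker's `w_mem` gives `k + 1` granules. -/
theorem fillMem_store (mem : Mem) (g k : Nat) :
    fillMem mem g 0 (k + 1) = (fillMem mem g 0 k).writeLE (UInt64.ofNat (g + k) + 12582912) 1 0 := by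
  rw [fillMem_snoc, Mem.writeLE_one, shadowAddr_eq]
  rfl

/-- **The exit with nothing left** (`size % 8 = 0`): the `k = size / 8` granules filled are all of `unpoisonMem`. -/
theorem unpoisonMem_full (mem : Mem) (a n k : Nat) (hkm : 0 + 8 * k = n) :
    fillMem mem (a / 8) 0 k = unpoisonMem mem a n := by
  have e1 : n % 8 = 0 := by omega
  have e2 : n / 8 = k := by omega
  unfold unpoisonMem
  rw [if_pos e1, e2]

/-- **The exit with `0 < m < 8` bytes left** (0x100c20 `mov [rdi + C00000H], sil`, asan_rt.c:138): the `k = size / 8` granules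
filled and the store of `m = size % 8` at the next one are `unpoisonMem`. -/
theorem unpoisonMem_part (mem : Mem) (a n k m : Nat) (hkm : m + 8 * k = n) (hm0 : 0 < m) (hm7 : m ≤ 7) :
    (fillMem mem (a / 8) 0 k).writeLE (UInt64.ofNat (a / 8 + k) + 12582912) 1 (Word.part Width.w8 (UInt64.ofNat m)).toNat =
      unpoisonMem mem a n := by
  have e1 : ¬ n % 8 = 0 := by omega
  have e2 : n / 8 = k := by omega
  have e3 : n % 8 = m := by omega
  have e4 : m % 256 = m := by omega
  rw [Mem.writeLE_one, shadowAddr_eq, part8_ofNat_small m hm7, e4]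
  unfold unpoisonMem
  rw [if_neg e1, e2, e3]

/-- The footprint clause of `Returned`, from the memory the post states: `unpoisonMem` writes `shadowSpan` only
(`unpoisonMem_sameExcept`), and the contract's footprint has that window (besides the empty stack frame). -/
theorem same_of_mem {u v : State} (h8 : (u.reg .rdi).toNat % 8 = 0)
    (hhi : (u.reg .rdi).toNat + (u.reg .rsi).toNat ≤ 0xC00000)
    (hmem : v.mem = unpoisonMem u.mem (u.reg .rdi).toNat (u.reg .rsi).toNat) :
    Mem.SameExcept (arenaUnpoisonSpec.footprint u) u.mem v.mem := by
  rw [hmem]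
  refine (unpoisonMem_sameExcept u.mem _ _ h8 hhi).mono ?_
  intro w hw a h1 h2
  exact ⟨w, List.mem_cons_of_mem _ hw, h1, h2⟩

end Vorbis.Spec.arena_unpoison

/-- `arena_unpoison(rdi = addr, rsi = size)` satisfies its contract `Asan.arenaUnpoisonSpec`: `shr rdi, 3`, a loop that stores
one shadow byte 0 per full granule (`u_loop` / `u_loop_back`; invariant: `k` granules filled = `fillMem … k`, `m = size - 8 k`
bytes left), then one store of `size % 8` if that is not 0, `ret`. No check call, no frame. -/
theorem Vorbis.Spec.Worked.arena_unpoison_ok : Vorbis.Spec.arena_unpoison.Statement := by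
  intro Lay hLay μ hμ u₀ hcode u ret he hpre
  v_entry he
  obtain ⟨h8, hlo, hhi⟩ := hpre
  -- (a fact about the vector registers, so that the walk tracks them: `Keeps` in the post)
  have hzmm : u.zmm = u.zmm := rfl
  -- 0x100c00 `shr rdi, 3` (asan_rt.c:131 `g = addr >> 3`), 0x100c04 `jmp` to the loop head
  u_walk hcode [hμ.vendor] until [Vorbis.L.arena_unpoison.loop1] span [Vorbis.L.textLo, Vorbis.L.textHi] side (v_side)
  -- THE LOOP HEAD 0x100c15 (asan_rt.c:132 `while (size >= 8)`): `k` granules are filled, `m` bytes are left. The memory is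
  -- stated as `… = s.mem` (right to left), so that the walker keeps `s.mem` as the base memory of its stores and reads the
  -- return address through them with `hs0`.
  obtain ⟨k, m, hkm, hrdi, hrsi, hmem⟩ : ∃ k m : Nat, m + 8 * k = (u.reg .rsi).toNat ∧
      s_100c04.reg .rdi = UInt64.ofNat ((u.reg .rdi).toNat / 8 + k) ∧
      s_100c04.reg .rsi = UInt64.ofNat m ∧
      fillMem u.mem ((u.reg .rdi).toNat / 8) 0 k = s_100c04.mem := by
    refine ⟨0, (u.reg .rsi).toNat, by omega, ?_, ?_, ?_⟩
    · rw [w_rdi, Nat.add_zero, ← toNat_shr3, UInt64.ofNat_toNat]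
    · rw [w_kept.get .rsi rfl, UInt64.ofNat_toNat]
    · exact w_mem.symm
  have hs0 : UInt64.ofNat (s_100c04.mem.readLE (u.reg .rsp) 8) = ret := by
    rw [w_mem]
    exact he_retAddr
  have hdf : s_100c04.flags .df = false := by
    rw [w_flags, X86.User.df_setStatus]
    exact he_df
  replace w_kept := w_kept.mono_all (S' := [.rdi, .rsi]) (by rfl)
  clear w_mem w_flags w_rdi
  u_loop [k, m] (fun v => (v.reg .rsi).toNat)
  -- the body 0x100c15 … 0x100c11 and, through the exit, 0x100c1b … 0x100c27
  u_walk hcode [hμ.vendor] until [Vorbis.L.arena_unpoison.loop1] span [Vorbis.L.textLo, Vorbis.L.textHi] side (v_side)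
  · -- THE BACK EDGE 0x100c11 → 0x100c15 (`jg` taken: 8 ≤ m): one more granule filled, eight bytes less to go
    have hm63 : m < 2 ^ 63 := by omega
    have hm : 8 ≤ m := (Vorbis.Spec.arena_unpoison.jg_iff m hm63).mp hbr_100c19
    have hsub := Vorbis.Spec.arena_unpoison.ofNat_sub_eight m hm
    u_loop_back [k + 1, m - 8]
    · -- the bytes left and the granules filled still add up to `size`
      omega
    · -- rdi, the granule counter
      rw [w_rdi]
      exact Vorbis.Spec.arena_unpoison.ofNat_add_one _ k
    · -- rsi, the bytes left
      rw [w_rsi]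
      exact hsub
    · -- the memory: the store of this round is the next store of `fillMem`
      rw [w_mem, ← hmem]
      exact Vorbis.Spec.arena_unpoison.fillMem_store u.mem _ k
    · -- the direction flag: `sub` wrote status flags only
      rw [w_flags, X86.User.df_setStatus]
      exact hdf
    · -- the measure: the bytes left
      rw [w_rsi, hsub, Vorbis.Spec.arena_unpoison.toNat_ofNat_small m hm63,
        Vorbis.Spec.arena_unpoison.toNat_ofNat_small (m - 8) (by omega)]
      omega
  · -- THE EXIT WITH `size = 0` left (`jg` not taken, 0x100c1e `jle` taken, asan_rt.c:137), 0x100c27 `ret`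
    have hm63 : m < 2 ^ 63 := by omega
    have hm : m = 0 := (Vorbis.Spec.arena_unpoison.jle_iff m hm63).mp hbr_100c1e
    subst hm
    have hpost : s_100c27.mem = unpoisonMem u.mem (u.reg .rdi).toNat (u.reg .rsi).toNat := by
      rw [w_mem, ← hmem]
      exact Vorbis.Spec.arena_unpoison.unpoisonMem_full u.mem _ _ k hkm
    -- (the two facts about the return address are used up; `v_inv`'s `assumption` spends 5 s on each of them)
    clear he_retAddr hs0
    refine ReachVia.done (Or.inl ?_)
    v_returned
    · -- the post: the memory, and `Keeps clobArena`
      exact ⟨hpost, w_kept.mono_all (by rfl), w_zmm, w_mxcsr⟩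
    · -- `same`: the footprint
      exact Vorbis.Spec.arena_unpoison.same_of_mem h8 hhi hpost
  · -- THE EXIT WITH `0 < size < 8` left: 0x100c20 stores it at the next granule (asan_rt.c:138), 0x100c27 `ret`
    have hm63 : m < 2 ^ 63 := by omega
    have hm7 : m ≤ 7 := by
      have hnot : ¬ 8 ≤ m := fun h => hbr_100c19 ((Vorbis.Spec.arena_unpoison.jg_iff m hm63).mpr h)
      omega
    have hm0 : 0 < m := by
      have hnot : ¬ m = 0 := fun h => hbr_100c1e ((Vorbis.Spec.arena_unpoison.jle_iff m hm63).mpr h)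
      omega
    have hpost : s_100c27.mem = unpoisonMem u.mem (u.reg .rdi).toNat (u.reg .rsi).toNat := by
      rw [w_mem, ← hmem]
      exact Vorbis.Spec.arena_unpoison.unpoisonMem_part u.mem _ _ k m hkm hm0 hm7
    -- (the two facts about the return address are used up; `v_inv`'s `assumption` spends 5 s on each of them)
    clear he_retAddr hs0
    refine ReachVia.done (Or.inl ?_)
    v_returned
    · -- the post: the memory, and `Keeps clobArena`
      exact ⟨hpost, w_kept.mono_all (by rfl), w_zmm, w_mxcsr⟩
    · -- `same`: the footprint
      exact Vorbis.Spec.arena_unpoison.same_of_mem h8 hhi hpost
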